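-- pv_equiv track=rewrite | github.com/phoro3/atcoder | ABC/ABC_116/C_problem.py | solve
-- ===== SOURCE A (Python) =====
-- def solve(lis):
--     # 全要素が0の場合
--     if is_all_zero(lis):
--         return 0
--
--     # 0がある場合、0を境に分割
--     zero_index = search_zero_index(lis)
--     if zero_index != -1:
--         return solve(lis[:zero_index]) + solve(lis[zero_index+1:])
--
--     # 0が無い場合、最小値の数をリスト全体から引く
--     min_num = min(lis)
--     lis = list(map(lambda x: x - min_num, lis))
--     return min_num + solve(lis)
--
-- def is_all_zero(lis):
--     return len(list(filter(lambda x : x == 0, lis))) == len(lis)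
--
-- def search_zero_index(lis):
--     if 0 in lis:
--         return lis.index(0)
--     else:
--         return -1
-- ===== SOURCE B (Python) =====
-- def solve(lis):
--     total = 0
--     prev = None  # None = at the start of a segment (list start or just after a zero)
--     for x in lis:
--         if x == 0:
--             prev = None
--         elif prev is None:
--             total += x
--             prev = x
--         else:
--             total += max(0, x - prev)
--             prev = x
--     return total
-- ===== Notes on version B (the rewrite author's own statement) =====
-- stated objective: faster
-- what changed: Replaced A's recursive split-at-zero / subtract-the-minimum scheme (repeated scans and list rebuilds) by a single left-to-right pass that adds each segment's first element and every positive rise, resetting at zeros.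
import Mathlib
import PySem

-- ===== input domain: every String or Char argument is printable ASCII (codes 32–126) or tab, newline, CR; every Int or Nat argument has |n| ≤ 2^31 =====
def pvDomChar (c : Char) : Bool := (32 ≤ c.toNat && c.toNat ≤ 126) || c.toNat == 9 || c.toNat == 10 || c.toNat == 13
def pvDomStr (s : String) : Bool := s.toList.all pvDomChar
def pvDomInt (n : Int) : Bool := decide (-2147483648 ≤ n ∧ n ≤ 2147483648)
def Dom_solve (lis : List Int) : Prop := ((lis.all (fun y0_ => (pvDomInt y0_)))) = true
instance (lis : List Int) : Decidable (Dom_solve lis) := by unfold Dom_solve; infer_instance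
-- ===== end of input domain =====

-- B replaces A's recursive split-at-zero / subtract-the-minimum scheme by one left-to-right
-- pass (segment start + positive rises, reset at zeros); objective: faster.

-- ===== PORT A =====
def isAllZero (lis : List Int) : Bool :=
  (lis.filter (fun x => x == 0)).length == lis.length

def searchZeroIndex (lis : List Int) : Int :=
  match PySem.List.index? lis 0 with
  | some i => (i : Int)
  | none => -1

-- facts the port cites for termination (searchZeroIndex ≠ -1 names a real in-range index)
theorem searchZeroIndex_spec {lis : List Int} (h : searchZeroIndex lis ≠ -1) :
    ∃ i : Nat, PySem.List.index? lis 0 = some i ∧ searchZeroIndex lis = (i : Int) ∧ i < lis.length := by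
  rcases hi : PySem.List.index? lis 0 with _ | i
  · exact absurd (by simp [searchZeroIndex, PySem.List.index?_eq_idxOf? lis 0 ▸ hi]) h
  · rcases PySem.List.getElem_of_index?_eq_some hi with ⟨hk, _, _⟩
    exact ⟨i, rfl, by simp [searchZeroIndex, PySem.List.index?_eq_idxOf? lis 0 ▸ hi], hk⟩

theorem zero_mem_of_index?_some {lis : List Int} {i : Nat}
    (hi : PySem.List.index? lis 0 = some i) : (0 : Int) ∈ lis :=
  (PySem.List.index?_isSome_iff lis 0).mp (by rw [hi]; rfl)

theorem searchZeroIndex_ne_neg_one_of_mem {lis : List Int} (hmem : (0:Int) ∈ lis) :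
    searchZeroIndex lis ≠ -1 := by
  have hs := (PySem.List.index?_isSome_iff lis 0).mpr hmem
  rcases hos : PySem.List.index? lis 0 with _ | j
  · rw [hos] at hs; simp at hs
  · simp [searchZeroIndex, PySem.List.index?_eq_idxOf? lis 0 ▸ hos]

theorem min_mem_map_sub {lis : List Int} {m : Int}
    (h : PySem.List.min? lis (fun x => x) = some m) :
    (0 : Int) ∈ lis.map (fun x => x - m) := by
  have hm := PySem.List.min?_mem h
  exact List.mem_map.mpr ⟨m, hm, by ring⟩

def solve (lis : List Int) : Int :=
  if isAllZero lis then 0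
  else
    let zeroIndex := searchZeroIndex lis
    if hz : zeroIndex ≠ -1 then
      solve (PySem.List.slice lis none (some zeroIndex)) +
        solve (PySem.List.slice lis (some (zeroIndex + 1)) none)
    else
      match hmin : PySem.List.min? lis (fun x => x) with
      | none => 0   -- unreachable: Python's min is only reached on a nonempty list
      | some m => m + solve (lis.map (fun x => x - m))
termination_by 2 * lis.length + (if (0:Int) ∈ lis then 0 else 1)
decreasing_by
  · rcases searchZeroIndex_spec hz with ⟨i, hi, he, hlt⟩
    have hmem := zero_mem_of_index?_some hi
    have hc : (if (0:Int) ∈ List.take i lis then 0 else 1) ≤ 1 := by split <;> omega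
    simp only [he, PySem.List.slice_to_natCast, hmem, if_pos, List.length_take]
    omega
  · rcases searchZeroIndex_spec hz with ⟨i, hi, he, hlt⟩
    have hmem := zero_mem_of_index?_some hi
    have h1 : searchZeroIndex lis + 1 = ((i + 1 : Nat) : Int) := by rw [he]; push_cast; ring
    have hc : (if (0:Int) ∈ List.drop (i + 1) lis then 0 else 1) ≤ 1 := by split <;> omega
    simp only [h1, PySem.List.slice_from_natCast, hmem, if_pos, List.length_drop]
    omega
  · have h0 : (0:Int) ∈ lis.map (fun x => x - m) := min_mem_map_sub hmin
    have hnz : (0:Int) ∉ lis := fun hmem => hz (searchZeroIndex_ne_neg_one_of_mem hmem)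
    have h0a : (0:Int) ∈ lis.attach.map (fun x => x.1 - m) := by simpa using h0
    simp only [List.length_attach, h0a, if_pos, List.length_map]
    rw [if_neg hnz]
    omega

-- ===== PORT B =====
def stepB (st : Option Int × Int) (x : Int) : Option Int × Int :=
  if x = 0 then (none, st.2)
  else
    match st.1 with
    | none => (some x, st.2 + x)
    | some p => (some x, st.2 + max 0 (x - p))

def solve_alt (lis : List Int) : Int :=
  (lis.foldl stepB (none, 0)).2

-- ===== PRECONDITION & SPEC =====
def Spec_solve (lis : List Int) (out : Int) : Prop := out = solve_alt lis
instance (lis : List Int) (out : Int) : Decidable (Spec_solve lis out) := by unfold Spec_solve; infer_instance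

-- ===== CLAIM (what is proved, stated in full; the proofs are below) =====
def Claim_equal_solve : Prop := ∀ (lis : List Int), Dom_solve lis → Spec_solve lis (solve lis)

-- ===== LEMMAS AND PROOFS =====

-- the accumulator is purely additive, and the state does not depend on it
theorem foldl_stepB_acc (xs : List Int) (s : Option Int) (acc : Int) :
    xs.foldl stepB (s, acc) = ((xs.foldl stepB (s, 0)).1, acc + (xs.foldl stepB (s, 0)).2) := by
  induction xs generalizing s acc with
  | nil => simp
  | cons x xs ih =>
    simp only [List.foldl_cons]
    have hstep : stepB (s, acc) x = ((stepB (s, 0) x).1, acc + (stepB (s, 0) x).2) := by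
      unfold stepB; rcases s with _ | p <;> split_ifs <;> simp
    rw [hstep, ih ((stepB (s, 0) x).1) (acc + (stepB (s, 0) x).2),
        ih ((stepB (s, 0) x).1) (stepB (s, 0) x).2]
    simp [add_assoc]

theorem foldl_stepB_all_zero (xs : List Int) (s : Option Int) (acc : Int)
    (h : ∀ x ∈ xs, x = 0) : (xs.foldl stepB (s, acc)).2 = acc := by
  induction xs generalizing s with
  | nil => rfl
  | cons x xs ih =>
    have hx : x = 0 := h x (by simp)
    simp only [List.foldl_cons, hx, stepB, if_pos]
    exact ih none (fun y hy => h y (by simp [hy]))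

-- splitting at a zero element
theorem solve_alt_split (pre suf : List Int) :
    solve_alt (pre ++ 0 :: suf) = solve_alt pre + solve_alt suf := by
  unfold solve_alt
  rw [List.foldl_append, List.foldl_cons]
  have h0 : stepB (pre.foldl stepB (none, 0)) 0 = (none, (pre.foldl stepB (none, 0)).2) := by
    unfold stepB; simp
  rw [h0, foldl_stepB_acc suf none ((pre.foldl stepB (none, 0)).2)]

-- relates the running state before and after a uniform shift by m
def mst (m p : Int) : Option Int := if p = m then none else some (p - m)

theorem foldl_stepB_shift (m : Int) (xs : List Int)
    (hx : ∀ x ∈ xs, m ≤ x ∧ x ≠ 0) :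
    ∀ p acc, m ≤ p →
      (xs.foldl stepB (some p, acc)).2 =
        ((xs.map (fun x => x - m)).foldl stepB (mst m p, acc)).2 := by
  induction xs with
  | nil => intro p acc _; rfl
  | cons x xs ih =>
    intro p acc hp
    obtain ⟨hmx, hx0⟩ := hx x (by simp)
    have hxs : ∀ y ∈ xs, m ≤ y ∧ y ≠ 0 := fun y hy => hx y (by simp [hy])
    simp only [List.map_cons, List.foldl_cons]
    by_cases hxm : x = m
    · -- mapped value is 0; original adds max 0 (m - p) = 0
      subst hxm
      have h1 : stepB (some p, acc) x = (some x, acc) := by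
        unfold stepB
        have hm0 : max 0 (x - p) = 0 := by omega
        simp [hx0, hm0]
      have h2 : stepB (mst x p, acc) (x - x) = (none, acc) := by
        unfold stepB; simp
      rw [h1, h2]
      simpa [mst] using ih hxs x acc (le_refl x)
    · -- mapped value x - m ≠ 0
      have hlt : m < x := lt_of_le_of_ne hmx (Ne.symm hxm)
      have h1 : stepB (some p, acc) x = (some x, acc + max 0 (x - p)) := by
        unfold stepB; simp [hx0]
      have h2 : stepB (mst m p, acc) (x - m) = (some (x - m), acc + max 0 (x - p)) := by
        unfold stepB mst
        have hne : ¬ (x - m = 0) := by omega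
        by_cases hpm : p = m
        · have hmax : max 0 (x - m) = x - m := by omega
          simp [hne, hpm, hmax]
        · have hd : x - m - (p - m) = x - p := by ring
          simp [hne, hpm, hd]
      rw [h1, h2]
      simpa [mst, hxm] using ih hxs x (acc + max 0 (x - p)) hmx

-- top-level shift: on a nonempty zero-free list, B commutes with subtracting the minimum
theorem solve_alt_shift (x : Int) (rest : List Int) (m : Int)
    (hm : m ≤ x) (hx0 : x ≠ 0) (hrest : ∀ y ∈ rest, m ≤ y ∧ y ≠ 0) :
    solve_alt (x :: rest) = m + solve_alt ((x :: rest).map (fun y => y - m)) := by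
  unfold solve_alt
  simp only [List.map_cons, List.foldl_cons]
  have h1 : stepB (none, 0) x = (some x, x) := by unfold stepB; simp [hx0]
  have h2 : stepB (none, 0) (x - m) = (mst m x, x - m) := by
    unfold stepB mst
    by_cases hxm : x = m
    · simp [hxm]
    · have hne : ¬ (x - m = 0) := by omega
      simp [hne, hxm]
  rw [h1, h2, ← foldl_stepB_shift m rest hrest x (x - m) hm,
      foldl_stepB_acc rest (some x) x, foldl_stepB_acc rest (some x) (x - m)]
  ring

theorem isAllZero_iff (lis : List Int) : isAllZero lis = true ↔ ∀ x ∈ lis, x = 0 := by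
  unfold isAllZero
  rw [beq_iff_eq, List.length_filter_eq_length_iff]
  simp

theorem solve_eq_alt : ∀ n : Nat, ∀ lis : List Int,
    2 * lis.length + (if (0:Int) ∈ lis then 0 else 1) ≤ n → solve lis = solve_alt lis := by
  intro n
  induction n with
  | zero =>
    intro lis h
    exfalso
    by_cases hm : (0:Int) ∈ lis
    · rw [if_pos hm] at h
      have : lis = [] := List.length_eq_zero_iff.mp (by omega)
      subst this; simp at hm
    · rw [if_neg hm] at h; omega
  | succ n ih =>
    intro lis hle
    rw [solve]
    by_cases hz : isAllZero lis = true
    · rw [if_pos hz]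
      exact (foldl_stepB_all_zero lis none 0 ((isAllZero_iff lis).mp hz)).symm
    · rw [if_neg hz]
      simp only
      by_cases hzi : searchZeroIndex lis ≠ -1
      · rw [dif_pos hzi]
        rcases searchZeroIndex_spec hzi with ⟨i, hi, he, hlt⟩
        rcases (PySem.List.index?_eq_some_iff lis 0 i).mp hi with ⟨pre, suf, hsplit, hlen, _⟩
        have hmem := zero_mem_of_index?_some hi
        have hslice1 : PySem.List.slice lis none (some (searchZeroIndex lis)) = pre := by
          rw [he, PySem.List.slice_to_natCast, hsplit, ← hlen, List.take_left]
        have hslice2 : PySem.List.slice lis (some (searchZeroIndex lis + 1)) none = suf := by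
          have h1 : searchZeroIndex lis + 1 = ((i + 1 : Nat) : Int) := by rw [he]; push_cast; ring
          rw [h1, PySem.List.slice_from_natCast, hsplit, ← hlen]
          have h2 : pre ++ 0 :: suf = (pre ++ [0]) ++ suf := by simp
          have h3 : pre.length + 1 = (pre ++ [0]).length := by simp
          rw [h2, h3, List.drop_left]
        rw [hslice1, hslice2]
        have hn : lis.length = pre.length + suf.length + 1 := by rw [hsplit]; simp; omega
        rw [if_pos hmem] at hle
        have hcp : (if (0:Int) ∈ pre then 0 else 1) ≤ 1 := by split <;> omega
        have hcs : (if (0:Int) ∈ suf then 0 else 1) ≤ 1 := by split <;> omega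
        rw [ih pre (by omega), ih suf (by omega), hsplit, solve_alt_split]
      · rw [dif_neg hzi]
        rw [not_not] at hzi
        have hnz : (0:Int) ∉ lis := fun hmem =>
          searchZeroIndex_ne_neg_one_of_mem hmem hzi
        have hne : lis ≠ [] := by
          intro h; subst h; exact hz ((isAllZero_iff []).mpr (by simp))
        rcases hmin : PySem.List.min? lis (fun x => x) with _ | m
        · exact absurd ((PySem.List.min?_eq_none_iff lis (fun x => x)).mp hmin) hne
        · simp only
          have hmlow : ∀ y ∈ lis, m ≤ y := PySem.List.min?_isMin hmin
          have hcond : ∀ y ∈ lis, m ≤ y ∧ y ≠ 0 :=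
            fun y hy => ⟨hmlow y hy, fun h => hnz (h ▸ hy)⟩
          have h0map : (0:Int) ∈ lis.map (fun x => x - m) := min_mem_map_sub hmin
          have hrec : solve (lis.map (fun x => x - m)) = solve_alt (lis.map (fun x => x - m)) := by
            apply ih
            rw [if_neg hnz] at hle
            rw [if_pos h0map, List.length_map]
            omega
          rw [hrec]
          cases lis with
          | nil => exact absurd rfl hne
          | cons x rest =>
            have hx := hcond x (by simp)
            exact (solve_alt_shift x rest m hx.1 hx.2
              (fun y hy => hcond y (by simp [hy]))).symm

-- ===== VERDICT (by name: the statement is the Claim_ definition above) =====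
theorem solve_spec : Claim_equal_solve := by
  intro lis _
  unfold Spec_solve
  exact solve_eq_alt (2 * lis.length + (if (0:Int) ∈ lis then 0 else 1)) lis (le_refl _)
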